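-- pv_equiv track=rewrite | github.com/aleexnl/aws-python | UF2/Practica 26/Ejercicio 2/module/functions.py | vector_check
-- ===== SOURCE A (Python) =====
-- def vector_check(vector_one, vector_two):  # Llamada a la funcion
--     if vector_one[0] == vector_two[0]:  # Si la posición del vector 1 es igual que la del dos devuelve true
--         return True
--     else:
--         if vector_one[-1] == vector_two[-1]:  # Si la posición del vector 1 es igual que la del dos
--             return vector_check(vector_one[:-1], vector_two[:-1])  # Llamamo ¡s a la función restandole uno a la lista
--         else:
--             return False  # Si no se cumple la condición directamente devolvemos false
-- ===== SOURCE B (Python) =====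
-- def vector_check(vector_one, vector_two):
--     # The recursion in A only trims tails and never changes the first elements,
--     # so the result is just the top-level first-element comparison.
--     return vector_one[0] == vector_two[0]
-- ===== Notes on version B (the rewrite author's own statement) =====
-- stated objective: simpler
-- what changed: Replaced the tail-trimming recursion with the single closed-form first-element comparison, which the recursion's invariant (first elements never change; the recursion can only end in False once they differ) makes equal.
import Mathlib
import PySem

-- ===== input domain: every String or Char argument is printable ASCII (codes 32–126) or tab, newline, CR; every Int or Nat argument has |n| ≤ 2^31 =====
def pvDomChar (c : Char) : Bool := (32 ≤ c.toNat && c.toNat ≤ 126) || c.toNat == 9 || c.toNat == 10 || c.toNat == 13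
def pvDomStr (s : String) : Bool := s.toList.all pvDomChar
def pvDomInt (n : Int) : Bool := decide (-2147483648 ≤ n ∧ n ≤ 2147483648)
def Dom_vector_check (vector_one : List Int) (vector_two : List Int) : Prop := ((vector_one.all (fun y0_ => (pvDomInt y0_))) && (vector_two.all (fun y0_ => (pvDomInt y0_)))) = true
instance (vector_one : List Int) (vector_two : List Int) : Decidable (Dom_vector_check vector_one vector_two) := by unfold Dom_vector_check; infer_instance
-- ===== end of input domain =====

-- B replaces A's tail-trimming recursion with the single first-element comparison (simpler).


-- ===== PORT A =====
-- A raises IndexError where pyGet? returns none; those inputs are excluded by Pre_ and the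
-- port returns false there (value irrelevant under the claim).
def vector_check (vector_one : List Int) (vector_two : List Int) : Bool :=
  match h1 : PySem.List.pyGet? vector_one 0, PySem.List.pyGet? vector_two 0 with
  | some a, some b =>
    if a = b then true
    else
      match PySem.List.pyGet? vector_one (-1), PySem.List.pyGet? vector_two (-1) with
      | some c, some d =>
        if c = d then
          vector_check (PySem.List.slice vector_one none (some (-1)))
                       (PySem.List.slice vector_two none (some (-1)))
        else false
      | _, _ => false
  | _, _ => false
termination_by vector_one.length
decreasing_by
  have hne : vector_one ≠ [] := by
    intro h; subst h; simp [PySem.List.pyGet?, PySem.List.pyIdx?] at h1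
  simp only [PySem.List.slice_to_neg_one, List.length_dropLast]
  have : 0 < vector_one.length := List.length_pos_iff.mpr hne
  omega

-- ===== PORT B =====
def vector_check_alt (vector_one : List Int) (vector_two : List Int) : Bool :=
  match PySem.List.pyGet? vector_one 0 with
  | some a =>
    match PySem.List.pyGet? vector_two 0 with
    | some b => a == b
    | none => false
  | none => false

-- ===== PRECONDITION & SPEC =====
-- Pre_ excludes exactly the inputs on which Python A raises IndexError: an empty list, or
-- unequal-length lists with unequal first elements whose common suffix of length min(len1,len2)
-- is equal (the recursion then empties the shorter list and indexes into []).
def Pre_vector_check (vector_one : List Int) (vector_two : List Int) : Prop :=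
  vector_one ≠ [] ∧ vector_two ≠ [] ∧
  (vector_one.head? = vector_two.head? ∨ vector_one.length = vector_two.length ∨
    vector_one.drop (vector_one.length - min vector_one.length vector_two.length) ≠
    vector_two.drop (vector_two.length - min vector_one.length vector_two.length))
instance (vector_one : List Int) (vector_two : List Int) : Decidable (Pre_vector_check vector_one vector_two) := by unfold Pre_vector_check; infer_instance
def pvWitness_vector_check : List Int × List Int := ([1, 2], [1, 3])

def Spec_vector_check (vector_one : List Int) (vector_two : List Int) (out : Bool) : Prop := out = vector_check_alt vector_one vector_two
instance (vector_one : List Int) (vector_two : List Int) (out : Bool) : Decidable (Spec_vector_check vector_one vector_two out) := by unfold Spec_vector_check; infer_instance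

-- ===== CLAIM (what is proved, stated in full; the proofs are below) =====
def Claim_equal_vector_check : Prop := ∀ (vector_one : List Int) (vector_two : List Int), Dom_vector_check vector_one vector_two → Pre_vector_check vector_one vector_two → Spec_vector_check vector_one vector_two (vector_check vector_one vector_two)

-- ===== LEMMAS AND PROOFS =====

theorem head?_concat_of_ne_nil {a : Type} (l : List a) (c : a) (h : l ≠ []) :
    (l ++ [c]).head? = l.head? := by
  cases l with
  | nil => exact absurd rfl h
  | cons x t => simp

theorem pre_step (v1 v2 : List Int) (a b c : Int)
    (hh1 : v1.head? = some a) (hh2 : v2.head? = some b) (hab : a ≠ b)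
    (hl1 : v1.getLast? = some c) (hl2 : v2.getLast? = some c)
    (hpre : Pre_vector_check v1 v2) :
    v1.dropLast ≠ [] ∧ v2.dropLast ≠ [] ∧ v1.dropLast.head? = some a ∧
      v2.dropLast.head? = some b ∧ Pre_vector_check v1.dropLast v2.dropLast := by
  obtain ⟨d1, rfl⟩ := List.getLast?_eq_some_iff.mp hl1
  obtain ⟨d2, rfl⟩ := List.getLast?_eq_some_iff.mp hl2
  obtain ⟨-, -, hdisj⟩ := hpre
  have hd1 : d1 ≠ [] := by
    rintro rfl
    have hca : c = a := by simpa using hh1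
    rcases eq_or_ne d2 [] with rfl | hd2
    · have hcb : c = b := by simpa using hh2
      exact hab (hca.symm.trans hcb)
    · have hh2' : d2.head? = some b := by
        rw [← head?_concat_of_ne_nil d2 c hd2]; exact hh2
      have hlen2 : 0 < d2.length := List.length_pos_iff.mpr hd2
      rcases hdisj with h | h | h
      · have : some c = some b := by
          have h' : (([] : List Int) ++ [c]).head? = some b := by rw [h, hh2]
          simpa using h'
        exact hab (hca.symm.trans (by simpa using this))
      · simp only [List.length_append, List.length_nil, List.length_cons] at h
        omega
      · apply h
        have hm : min (([] : List Int) ++ [c]).length (d2 ++ [c]).length = 1 := by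
          simp only [List.length_append, List.length_nil, List.length_cons]
          omega
        rw [hm]
        simp
  have hd2 : d2 ≠ [] := by
    rintro rfl
    have hcb : c = b := by simpa using hh2
    have hh1' : d1.head? = some a := by
      rw [← head?_concat_of_ne_nil d1 c hd1]; exact hh1
    have hlen1 : 0 < d1.length := List.length_pos_iff.mpr hd1
    rcases hdisj with h | h | h
    · have : some a = some c := by
        have h' : (d1 ++ [c]).head? = (([] : List Int) ++ [c]).head? := h
        rw [hh1] at h'
        simpa using h'
      exact hab ((by simpa using this : a = c).trans hcb)
    · simp only [List.length_append, List.length_nil, List.length_cons] at h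
      omega
    · apply h
      have hm : min (d1 ++ [c]).length (([] : List Int) ++ [c]).length = 1 := by
        simp only [List.length_append, List.length_nil, List.length_cons]
        omega
      rw [hm]
      simp
  have hh1' : d1.head? = some a := by rw [← head?_concat_of_ne_nil d1 c hd1]; exact hh1
  have hh2' : d2.head? = some b := by rw [← head?_concat_of_ne_nil d2 c hd2]; exact hh2
  refine ⟨by simp [hd1], by simp [hd2], by simpa using hh1', by simpa using hh2', ?_⟩
  refine ⟨by simpa using hd1, by simpa using hd2, ?_⟩
  simp only [List.dropLast_concat]
  rcases hdisj with h | h | h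
  · exfalso
    rw [head?_concat_of_ne_nil d1 c hd1, head?_concat_of_ne_nil d2 c hd2, hh1', hh2'] at h
    exact hab (by simpa using h)
  · simp only [List.length_append, List.length_nil, List.length_cons] at h
    exact Or.inr (Or.inl (by omega))
  · refine Or.inr (Or.inr ?_)
    intro heq
    apply h
    have hm : min (d1 ++ [c]).length (d2 ++ [c]).length =
        min d1.length d2.length + 1 := by
      simp only [List.length_append, List.length_nil, List.length_cons]
      omega
    rw [hm]
    have e1 : (d1 ++ [c]).length - (min d1.length d2.length + 1) =
        d1.length - min d1.length d2.length := by
      simp only [List.length_append, List.length_nil, List.length_cons]; omega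
    have e2 : (d2 ++ [c]).length - (min d1.length d2.length + 1) =
        d2.length - min d1.length d2.length := by
      simp only [List.length_append, List.length_nil, List.length_cons]; omega
    rw [e1, e2,
      List.drop_append_of_le_length (by omega),
      List.drop_append_of_le_length (by omega), heq]

theorem alt_eval (v1 v2 : List Int) (a b : Int)
    (h1 : PySem.List.pyGet? v1 0 = some a) (h2 : PySem.List.pyGet? v2 0 = some b) :
    vector_check_alt v1 v2 = (a == b) := by
  unfold vector_check_alt
  rw [h1, h2]

theorem head?_of_pyGet0 (v : List Int) (a : Int) (h : PySem.List.pyGet? v 0 = some a) :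
    v.head? = some a := by
  rw [List.head?_eq_getElem?, ← PySem.List.pyGet?_zero]; exact h

theorem main_lemma : ∀ (v1 v2 : List Int), Pre_vector_check v1 v2 →
    vector_check v1 v2 = vector_check_alt v1 v2 := by
  intro w1 w2
  induction w1, w2 using vector_check.induct with
  | case1 v1 v2 b h2 h1 =>
    intro _
    rw [alt_eval v1 v2 b b h1 h2]
    rw [vector_check.eq_def]
    split <;> simp_all
  | case2 v1 v2 a b h1 h2 hab d hl2 hl1 ih =>
    intro hpre
    have hh1 := head?_of_pyGet0 v1 a h1
    have hh2 := head?_of_pyGet0 v2 b h2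
    have hgl1 : v1.getLast? = some d := by rw [← PySem.List.pyGet?_neg_one]; exact hl1
    have hgl2 : v2.getLast? = some d := by rw [← PySem.List.pyGet?_neg_one]; exact hl2
    obtain ⟨hd1, hd2, hh1', hh2', hpre'⟩ :=
      pre_step v1 v2 a b d hh1 hh2 hab hgl1 hgl2 hpre
    have hrec : vector_check v1 v2 =
        vector_check (PySem.List.slice v1 none (some (-1)))
          (PySem.List.slice v2 none (some (-1))) := by
      rw [vector_check.eq_def]
      split <;> simp_all
    rw [hrec]
    have hpre'' : Pre_vector_check (PySem.List.slice v1 none (some (-1)))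
        (PySem.List.slice v2 none (some (-1))) := by
      simpa [PySem.List.slice_to_neg_one] using hpre'
    rw [ih hpre'']
    have ha' : PySem.List.pyGet? (PySem.List.slice v1 none (some (-1))) 0 = some a := by
      rw [PySem.List.pyGet?_zero, ← List.head?_eq_getElem?]
      simpa [PySem.List.slice_to_neg_one] using hh1'
    have hb' : PySem.List.pyGet? (PySem.List.slice v2 none (some (-1))) 0 = some b := by
      rw [PySem.List.pyGet?_zero, ← List.head?_eq_getElem?]
      simpa [PySem.List.slice_to_neg_one] using hh2'
    rw [alt_eval _ _ a b ha' hb', alt_eval v1 v2 a b h1 h2]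
  | case3 v1 v2 a b h1 h2 hab c d hl2 hl1 hcd =>
    intro _
    rw [alt_eval v1 v2 a b h1 h2]
    rw [vector_check.eq_def]
    split <;> simp_all
  | case4 v1 v2 a b h1 h2 hab hnone =>
    intro hpre
    exfalso
    obtain ⟨hne1, hne2, -⟩ := hpre
    obtain ⟨c, hc⟩ : ∃ c, v1.getLast? = some c := by
      cases hgl : v1.getLast? with
      | none => exact absurd (List.getLast?_eq_none_iff.mp hgl) hne1
      | some c => exact ⟨c, rfl⟩
    obtain ⟨d, hd⟩ : ∃ d, v2.getLast? = some d := by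
      cases hgl : v2.getLast? with
      | none => exact absurd (List.getLast?_eq_none_iff.mp hgl) hne2
      | some d => exact ⟨d, rfl⟩
    exact hnone c d (by rw [PySem.List.pyGet?_neg_one]; exact hc)
      (by rw [PySem.List.pyGet?_neg_one]; exact hd)
  | case5 v1 v2 hnone =>
    intro hpre
    exfalso
    obtain ⟨hne1, hne2, -⟩ := hpre
    obtain ⟨a, ha⟩ : ∃ a, v1.head? = some a := by
      cases hh : v1.head? with
      | none => exact absurd (List.head?_eq_none_iff.mp hh) hne1
      | some a => exact ⟨a, rfl⟩
    obtain ⟨b, hb⟩ : ∃ b, v2.head? = some b := by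
      cases hh : v2.head? with
      | none => exact absurd (List.head?_eq_none_iff.mp hh) hne2
      | some b => exact ⟨b, rfl⟩
    refine hnone a b ?_ ?_
    · rw [PySem.List.pyGet?_zero, ← List.head?_eq_getElem?]; exact ha
    · rw [PySem.List.pyGet?_zero, ← List.head?_eq_getElem?]; exact hb

-- ===== VERDICT =====
theorem vector_check_spec : Claim_equal_vector_check := by
  intro v1 v2 _ hpre; exact main_lemma v1 v2 hpre
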